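-- pv_equiv track=rewrite | github.com/Perfectionist-code/STEPIK_COURSES | Year course EGE 2025/3.7 11.10 Решение задач №9/3_7_12.py | is_condition_1
-- ===== SOURCE A (Python) =====
-- from collections import Counter
--
-- def is_condition_1(*args) -> bool:
--     a, b, c, d, e, f, g = args
--     set_nums = set(args)
--     if set_nums.__len__() == 5:
--         _count = Counter(args)
--         for num in set_nums:
--             if _count[num] == 3:
--                 return True
--             elif _count[num] == 2:
--                 return False
--             elif _count[num] == 1:
--                 continue
--     return False
-- ===== SOURCE B (Python) =====
-- def is_condition_1(*args) -> bool:
--     a, b, c, d, e, f, g = args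
--     # Sum of count(x)^2 over the 7 positions equals the third moment sum(m**3) of the
--     # multiplicities m. Over all partitions of 7 these third moments are pairwise
--     # distinct, and 31 = 3**3 + 1 + 1 + 1 + 1 is attained exactly by the pattern
--     # 3+1+1+1+1, so one arithmetic test replaces the set/Counter branching.
--     return sum(args.count(x) ** 2 for x in args) == 31
-- ===== Notes on version B (the rewrite author's own statement) =====
-- stated objective: alternative
-- what changed: Replaces A's set/Counter construction and early-return scan over the distinct elements by a single arithmetic test: the sum of count(x)^2 over the 7 positions (the third moment of the multiplicities) equals 31 exactly for the 3+1+1+1+1 pattern, so no set, no Counter and no branching are needed.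
import Mathlib
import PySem

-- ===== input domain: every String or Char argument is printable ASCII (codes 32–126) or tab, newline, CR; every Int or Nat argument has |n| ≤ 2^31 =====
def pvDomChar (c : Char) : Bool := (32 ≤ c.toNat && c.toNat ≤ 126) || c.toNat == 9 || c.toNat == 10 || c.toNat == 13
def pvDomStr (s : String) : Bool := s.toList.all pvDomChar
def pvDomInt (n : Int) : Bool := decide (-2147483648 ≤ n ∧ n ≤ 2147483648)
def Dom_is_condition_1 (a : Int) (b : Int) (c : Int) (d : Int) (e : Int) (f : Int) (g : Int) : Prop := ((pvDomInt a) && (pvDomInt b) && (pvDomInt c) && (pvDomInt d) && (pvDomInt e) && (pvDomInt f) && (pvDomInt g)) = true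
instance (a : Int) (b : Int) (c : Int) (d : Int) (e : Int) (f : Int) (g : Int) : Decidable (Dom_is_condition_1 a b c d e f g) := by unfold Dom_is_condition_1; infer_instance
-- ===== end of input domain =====

-- B replaces A's set/Counter branching by one arithmetic test: the third moment of the
-- multiplicities (sum of count(x)^2 over positions) equals 31 exactly for 3+1+1+1+1
-- (objective: alternative; same cost).

-- ===== PORT A =====
-- the 'for num in set_nums' loop: return True on count 3, return False on count 2, else continue
def pvLoopA (cnt : PySem.Dict Int Int) : List Int → Bool
  | [] => false
  | n :: rest =>
    if cnt.getD n 0 = 3 then true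
    else if cnt.getD n 0 = 2 then false
    else pvLoopA cnt rest

-- A's result does not depend on the hash iteration order of set_nums (with 5 distinct among 7,
-- the signature is 3+1+1+1+1 → always True, or 2+2+1+1+1 → always False), so iterating the
-- Set in first-insertion order is exact.
def is_condition_1 (a : Int) (b : Int) (c : Int) (d : Int) (e : Int) (f : Int) (g : Int) : Bool :=
  let args : List Int := [a, b, c, d, e, f, g]
  let set_nums : PySem.Set Int := PySem.Set.ofList args
  if set_nums.length = 5 then
    pvLoopA (PySem.Dict.counter args) set_nums
  else
    false

-- ===== PORT B =====
def is_condition_1_alt (a : Int) (b : Int) (c : Int) (d : Int) (e : Int) (f : Int) (g : Int) : Bool :=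
  let args : List Int := [a, b, c, d, e, f, g]
  decide ((args.map (fun x => ((PySem.List.count args x : Nat) : Int) ^ 2)).sum = 31)

-- ===== PRECONDITION & SPEC =====
def Spec_is_condition_1 (a : Int) (b : Int) (c : Int) (d : Int) (e : Int) (f : Int) (g : Int) (out : Bool) : Prop := out = is_condition_1_alt a b c d e f g
instance (a : Int) (b : Int) (c : Int) (d : Int) (e : Int) (f : Int) (g : Int) (out : Bool) : Decidable (Spec_is_condition_1 a b c d e f g out) := by unfold Spec_is_condition_1; infer_instance

-- ===== CLAIM (what is proved, stated in full; the proofs are below) =====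
def Claim_equal_is_condition_1 : Prop := ∀ (a : Int) (b : Int) (c : Int) (d : Int) (e : Int) (f : Int) (g : Int), Dom_is_condition_1 a b c d e f g → Spec_is_condition_1 a b c d e f g (is_condition_1 a b c d e f g)

-- ===== LEMMAS AND PROOFS =====

-- A's loop only looks at the count of each distinct element: it is a scan over the list of counts.
def pvLoopV : List Int → Bool
  | [] => false
  | v :: rest => if v = 3 then true else if v = 2 then false else pvLoopV rest

theorem pvLoopA_eq_loopV (cnt : PySem.Dict Int Int) (l : List Int) :
    pvLoopA cnt l = pvLoopV (l.map (fun k => cnt.getD k 0)) := by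
  induction l with
  | nil => rfl
  | cons n rest ih => simp only [pvLoopA, pvLoopV, List.map_cons, ih]

theorem pvPerm_dedup (xs : List Int) : (PySem.Set.ofList xs).Perm xs.dedup := by
  rw [List.perm_ext_iff_of_nodup (PySem.Set.nodup_ofList xs) xs.nodup_dedup]
  intro a; simp [PySem.Set.mem_ofList, List.mem_dedup]

-- the distinct elements' counts sum to the length of the list
theorem pvSum_counts (xs : List Int) :
    ((PySem.Set.ofList xs).map (fun k => ((List.count k xs : Nat) : Int))).sum = (xs.length : Int) := by
  calc ((PySem.Set.ofList xs).map (fun k => ((List.count k xs : Nat) : Int))).sum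
      = (xs.dedup.map (fun k => ((List.count k xs : Nat) : Int))).sum :=
        ((pvPerm_dedup xs).map _).sum_eq
    _ = ((xs.dedup.map (fun k => List.count k xs)).sum : Int) := by
        rw [Nat.cast_list_sum, List.map_map]; rfl
    _ = (xs.length : Int) := by rw [List.sum_map_count_dedup_eq_length]

-- grouping: the per-position sum of count(x)^2 is the per-distinct sum of count(k)^3
theorem pvGroup (xs : List Int) :
    (xs.map (fun x => ((List.count x xs : Nat) : Int) ^ 2)).sum
      = ((PySem.Set.ofList xs).map (fun k => ((List.count k xs : Nat) : Int) ^ 3)).sum := by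
  rw [Finset.sum_list_map_count xs (fun x => ((List.count x xs : Nat) : Int) ^ 2),
      ((pvPerm_dedup xs).map (fun k => ((List.count k xs : Nat) : Int) ^ 3)).sum_eq,
      ← List.sum_toFinset _ xs.nodup_dedup,
      show xs.dedup.toFinset = xs.toFinset by ext x; simp [List.mem_toFinset, List.mem_dedup]]
  apply Finset.sum_congr rfl
  intro m _
  rw [nsmul_eq_mul]
  ring

-- arithmetic core: for distinct counts each ≥ 1 summing to 7, A's branch-and-scan agrees
-- with B's third-moment test
theorem pvCore (vs : List Int) (h1 : ∀ v ∈ vs, 1 ≤ v) (hsum : vs.sum = 7) :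
    (if vs.length = 5 then pvLoopV vs else false)
      = decide ((vs.map (fun v => v ^ 3)).sum = 31) := by
  match vs with
  | [] => simp_all
  | [v1] =>
    simp only [List.sum_cons, List.sum_nil] at hsum
    have e1 : v1 = 7 := by omega
    subst e1; decide
  | [v1, v2] =>
    have b1 := h1 v1 (by simp); have b2 := h1 v2 (by simp)
    simp only [List.sum_cons, List.sum_nil] at hsum
    have u1 : v1 ≤ 6 := by omega
    have u2 : v2 ≤ 6 := by omega
    interval_cases v1 <;> interval_cases v2 <;> first | omega | decide
  | [v1, v2, v3] =>
    have b1 := h1 v1 (by simp); have b2 := h1 v2 (by simp); have b3 := h1 v3 (by simp)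
    simp only [List.sum_cons, List.sum_nil] at hsum
    have u1 : v1 ≤ 5 := by omega
    have u2 : v2 ≤ 5 := by omega
    have u3 : v3 ≤ 5 := by omega
    interval_cases v1 <;> interval_cases v2 <;> interval_cases v3 <;> first | omega | decide
  | [v1, v2, v3, v4] =>
    have b1 := h1 v1 (by simp); have b2 := h1 v2 (by simp); have b3 := h1 v3 (by simp)
    have b4 := h1 v4 (by simp)
    simp only [List.sum_cons, List.sum_nil] at hsum
    have u1 : v1 ≤ 4 := by omega
    have u2 : v2 ≤ 4 := by omega
    have u3 : v3 ≤ 4 := by omega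
    have u4 : v4 ≤ 4 := by omega
    interval_cases v1 <;> interval_cases v2 <;> interval_cases v3 <;> interval_cases v4 <;>
      first | omega | decide
  | [v1, v2, v3, v4, v5] =>
    have b1 := h1 v1 (by simp); have b2 := h1 v2 (by simp); have b3 := h1 v3 (by simp)
    have b4 := h1 v4 (by simp); have b5 := h1 v5 (by simp)
    simp only [List.sum_cons, List.sum_nil] at hsum
    have u1 : v1 ≤ 3 := by omega
    have u2 : v2 ≤ 3 := by omega
    have u3 : v3 ≤ 3 := by omega
    have u4 : v4 ≤ 3 := by omega
    have u5 : v5 ≤ 3 := by omega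
    interval_cases v1 <;> interval_cases v2 <;> interval_cases v3 <;> interval_cases v4 <;>
      interval_cases v5 <;> first | omega | decide
  | [v1, v2, v3, v4, v5, v6] =>
    have b1 := h1 v1 (by simp); have b2 := h1 v2 (by simp); have b3 := h1 v3 (by simp)
    have b4 := h1 v4 (by simp); have b5 := h1 v5 (by simp); have b6 := h1 v6 (by simp)
    simp only [List.sum_cons, List.sum_nil] at hsum
    have u1 : v1 ≤ 2 := by omega
    have u2 : v2 ≤ 2 := by omega
    have u3 : v3 ≤ 2 := by omega
    have u4 : v4 ≤ 2 := by omega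
    have u5 : v5 ≤ 2 := by omega
    have u6 : v6 ≤ 2 := by omega
    interval_cases v1 <;> interval_cases v2 <;> interval_cases v3 <;> interval_cases v4 <;>
      interval_cases v5 <;> interval_cases v6 <;> first | omega | decide
  | [v1, v2, v3, v4, v5, v6, v7] =>
    have b1 := h1 v1 (by simp); have b2 := h1 v2 (by simp); have b3 := h1 v3 (by simp)
    have b4 := h1 v4 (by simp); have b5 := h1 v5 (by simp); have b6 := h1 v6 (by simp)
    have b7 := h1 v7 (by simp)
    simp only [List.sum_cons, List.sum_nil] at hsum
    have e1 : v1 = 1 := by omega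
    have e2 : v2 = 1 := by omega
    have e3 : v3 = 1 := by omega
    have e4 : v4 = 1 := by omega
    have e5 : v5 = 1 := by omega
    have e6 : v6 = 1 := by omega
    have e7 : v7 = 1 := by omega
    subst e1; subst e2; subst e3; subst e4; subst e5; subst e6; subst e7; decide
  | v1 :: v2 :: v3 :: v4 :: v5 :: v6 :: v7 :: v8 :: rest =>
    exfalso
    have b1 := h1 v1 (by simp); have b2 := h1 v2 (by simp); have b3 := h1 v3 (by simp)
    have b4 := h1 v4 (by simp); have b5 := h1 v5 (by simp); have b6 := h1 v6 (by simp)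
    have b7 := h1 v7 (by simp); have b8 := h1 v8 (by simp)
    have hrest : 0 ≤ rest.sum := List.sum_nonneg (by
      intro x hx; exact le_trans (by norm_num) (h1 x (by simp [hx])))
    simp only [List.sum_cons] at hsum
    omega

-- ===== VERDICT (by name: the statement is the Claim_ definition above) =====
theorem is_condition_1_spec : Claim_equal_is_condition_1 := by
  intro a b c d e f g _
  simp only [Spec_is_condition_1, is_condition_1, is_condition_1_alt]
  set args : List Int := [a, b, c, d, e, f, g] with hargs
  set dls : List Int := PySem.Set.ofList args with hd
  -- B's per-position sum, rewritten as the third moment of the distinct counts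
  have hcount : (fun x => ((PySem.List.count args x : Nat) : Int) ^ 2)
      = (fun x => ((List.count x args : Nat) : Int) ^ 2) := by
    funext x; rw [PySem.List.count_eq]
  rw [hcount, pvGroup args, ← hd]
  have hmap3 : dls.map (fun k => ((List.count k args : Nat) : Int) ^ 3)
      = (dls.map (fun k => ((List.count k args : Nat) : Int))).map (fun v => v ^ 3) := by
    rw [List.map_map]; rfl
  rw [hmap3]
  -- A's side, rewritten as the branch-and-scan over the same distinct counts
  rw [pvLoopA_eq_loopV]
  have hmapc : dls.map (fun k => (PySem.Dict.counter args).getD k 0)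
      = dls.map (fun k => ((List.count k args : Nat) : Int)) :=
    List.map_congr_left (fun k _ => PySem.Dict.getD_counter args k)
  rw [hmapc]
  have hlen : (dls.map (fun k => ((List.count k args : Nat) : Int))).length = dls.length :=
    List.length_map ..
  rw [show (if dls.length = 5 then
        pvLoopV (dls.map fun k => ((List.count k args : Nat) : Int)) else false)
      = (if (dls.map fun k => ((List.count k args : Nat) : Int)).length = 5 then
        pvLoopV (dls.map fun k => ((List.count k args : Nat) : Int)) else false) by rw [hlen]]
  apply pvCore
  · intro v hv
    obtain ⟨k, hk, rfl⟩ := List.mem_map.mp hv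
    have : k ∈ args := (PySem.Set.mem_ofList args k).mp (hd ▸ hk)
    have : 0 < List.count k args := List.count_pos_iff.mpr this
    omega
  · have := pvSum_counts args
    rw [← hd] at this
    rw [this, hargs]; rfl
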